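-- pv_equiv track=rewrite | github.com/zxingz/CrescendoRTest | python/MyScript.py | activeYears
-- ===== SOURCE A (Python) =====
-- def activeYears(years):
--     years = list(set(sorted(years)))
--     years.append(-1)
--     res = []
--     counter = 1
--     for i in range(len(years)-1):
--         if int(years[i])+1 == int(years[i+1]):
--             counter += 1
--         else:
--             res.append(counter)
--             counter = 1
--     return res
-- ===== SOURCE B (Python) =====
-- from itertools import groupby
--
--
-- def activeYears(years):
--     years = list(set(sorted(years)))
--     years.append(-1)
--     groups = [sum(1 for _ in g)
--               for _, g in groupby(enumerate(years), key=lambda p: int(p[1]) - p[0])]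
--     return groups[:-1]
-- ===== Notes on version B (the rewrite author's own statement) =====
-- stated objective: idiomatic
-- what changed: Replaces the index loop with manual counter/flush state by the standard consecutive-run idiom: groupby over enumerate with key value-index groups the runs, a comprehension takes each run's length, and dropping the final (sentinel '-1') group replaces the end-of-loop flush logic.
import Mathlib
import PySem

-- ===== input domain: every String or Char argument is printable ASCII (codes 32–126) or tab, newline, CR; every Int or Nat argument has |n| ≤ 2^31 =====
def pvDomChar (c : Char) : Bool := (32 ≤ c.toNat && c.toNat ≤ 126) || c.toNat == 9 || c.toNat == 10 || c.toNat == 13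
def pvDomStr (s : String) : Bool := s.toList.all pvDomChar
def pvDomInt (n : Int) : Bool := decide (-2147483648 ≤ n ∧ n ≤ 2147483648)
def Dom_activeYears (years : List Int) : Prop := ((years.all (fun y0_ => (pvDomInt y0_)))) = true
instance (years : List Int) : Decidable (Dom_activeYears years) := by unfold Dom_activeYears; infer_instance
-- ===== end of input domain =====

-- B replaces A's index loop with manual counter/flush state by the groupby(enumerate, key = value - index)
-- consecutive-run idiom (objective: idiomatic); both Pythons keep `list(set(sorted(years)))` verbatim, so
-- each port carries a model of CPython 3.11's int-set insertion/iteration order (open addressing,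
-- LINEAR_PROBES=9, perturbed probing, growth at fill*5 >= mask*3), exact on the stated Dom
-- (|n| ≤ 2^31, where hash(n) = n except hash(-1) = -2); A's model is four specialized probe
-- recursions, B's is one generic probe engine over explicit slot lists.

-- ===== PORT A =====
-- hash of an int as a 64-bit size_t (two's complement); exact for |n| < 2^61 - 1
def pvHash (n : Int) : Nat := ((if n = -1 then -2 else n) % (18446744073709551616 : Int)).toNat

-- inner linear-probe scan of set_add_entry: checks slots i .. i+probes;
-- some (some j) = empty slot j found, some none = key already present, none = continue outer loop
def pvInner (t : List (Option Int)) (key : Int) : Nat → Nat → Option (Option Nat)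
  | i, 0 =>
    match t.getD i none with
    | none => some (some i)
    | some e => if e = key then some none else none
  | i, p+1 =>
    match t.getD i none with
    | none => some (some i)
    | some e => if e = key then some none else pvInner t key (i+1) p

-- outer probe loop of set_add_entry: perturb >>= 5; i = (i*5 + 1 + perturb) & mask.
-- fuel = mask+65 never runs out (perturb dies after 13 shifts, then i ↦ 5i+1 mod 2^k has full period
-- and the table always has an empty slot); the fuel-0 branch only makes the recursion total.
def pvOuter (t : List (Option Int)) (mask : Nat) (key : Int) : Nat → Nat → Nat → Option Nat
  | 0, _, _ => none
  | fuel+1, perturb, i =>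
    let probes := if i + 9 ≤ mask then 9 else 0
    match pvInner t key i probes with
    | some r => r
    | none =>
      let p' := perturb >>> 5
      pvOuter t mask key fuel p' ((i*5 + 1 + p') % (mask+1))

-- set_insert_clean's probe loops (no equality checks: the target table holds no duplicates)
def pvInnerClean (t : List (Option Int)) : Nat → Nat → Option Nat
  | i, 0 => if (t.getD i none).isNone then some i else none
  | i, p+1 => if (t.getD i none).isNone then some i else pvInnerClean t (i+1) p

def pvOuterClean (t : List (Option Int)) (mask : Nat) : Nat → Nat → Nat → Option Nat
  | 0, _, _ => none
  | fuel+1, perturb, i =>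
    let probes := if i + 9 ≤ mask then 9 else 0
    match pvInnerClean t i probes with
    | some j => some j
    | none =>
      let p' := perturb >>> 5
      pvOuterClean t mask fuel p' ((i*5 + 1 + p') % (mask+1))

def pvInsertClean (t : List (Option Int)) (key : Int) : List (Option Int) :=
  let mask := t.length - 1
  match pvOuterClean t mask (mask+65) (pvHash key) (pvHash key % (mask+1)) with
  | some idx => t.set idx (some key)
  | none => t

-- newsize = PySet_MINSIZE; while newsize <= minused: newsize <<= 1  (64 doublings always suffice)
def pvGrow (minused : Nat) : Nat → Nat → Nat
  | 0, ns => ns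
  | f+1, ns => if ns ≤ minused then pvGrow minused f (ns*2) else ns

-- set_add_entry + resize (set_table_resize reinserts the old table in slot order)
def pvAdd (st : List (Option Int) × Nat) (key : Int) : List (Option Int) × Nat :=
  let t := st.1
  let fill := st.2
  let mask := t.length - 1
  let h := pvHash key
  match pvOuter t mask key (mask+65) h (h % (mask+1)) with
  | none => st
  | some idx =>
    let t' := t.set idx (some key)
    let fill' := fill + 1
    if fill'*5 ≥ mask*3 then
      let minused := if fill' ≤ 50000 then fill'*4 else fill'*2
      let ns := pvGrow minused 64 8
      (t'.foldl (fun nt e => match e with | none => nt | some k => pvInsertClean nt k)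
        (List.replicate ns none), fill')
    else (t', fill')

-- list(set(xs)): insert xs left to right into a size-8 table, read the table in slot order
def pvSetList (xs : List Int) : List Int :=
  ((xs.foldl pvAdd (List.replicate 8 none, 0)).1).filterMap id

-- int(...) on an int is the identity and is ported as such
def activeYears (years : List Int) : List Int :=
  let ys := pvSetList (PySem.List.sorted years (fun x => x) false) ++ [-1]
  ((PySem.List.pyRange 0 (PySem.List.len ys - 1) 1).foldl
    (fun st i =>
      if PySem.List.pyGetD ys i 0 + 1 = PySem.List.pyGetD ys (i+1) 0 then
        (st.1, st.2 + 1)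
      else
        (st.1 ++ [st.2], (1 : Int)))
    ([], 1)).1

-- ===== PORT B =====
-- B's model of the same CPython set: the slots one outer probe step visits, as an explicit list
def pvSlotsB (mask j : Nat) : List Nat :=
  if j + 9 ≤ mask then List.range' j 10 else List.range' j 1

-- one generic slot scan: cmp = some k while adding key k (stop with `some none` when k is found),
-- cmp = none during a clean reinsertion (no equality checks); `some (some j)` = free slot j,
-- `none` = all scanned slots occupied by other keys
def pvScanB (tbl : List (Option Int)) (cmp : Option Int) : List Nat → Option (Option Nat)
  | [] => none
  | j :: rest =>
    match tbl.getD j none with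
    | none => some (some j)
    | some e => if cmp = some e then some none else pvScanB tbl cmp rest

-- one generic perturbed probe engine serving both set_add_entry and set_insert_clean
def pvProbeB (tbl : List (Option Int)) (mask : Nat) (cmp : Option Int) : Nat → Nat → Nat → Option Nat
  | 0, _, _ => none
  | fuel+1, perturb, j =>
    match pvScanB tbl cmp (pvSlotsB mask j) with
    | some r => r
    | none => pvProbeB tbl mask cmp fuel (perturb >>> 5) ((j*5 + 1 + perturb >>> 5) % (mask+1))

def pvInsertCleanB (tbl : List (Option Int)) (k : Int) : List (Option Int) :=
  (pvProbeB tbl (tbl.length - 1) none (tbl.length - 1 + 65) (pvHash k)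
      (pvHash k % (tbl.length - 1 + 1))).elim tbl (fun idx => tbl.set idx (some k))

def pvAddB (st : List (Option Int) × Nat) (k : Int) : List (Option Int) × Nat :=
  (pvProbeB st.1 (st.1.length - 1) (some k) (st.1.length - 1 + 65) (pvHash k)
      (pvHash k % (st.1.length - 1 + 1))).elim st (fun idx =>
    if (st.2 + 1)*5 ≥ (st.1.length - 1)*3 then
      ((st.1.set idx (some k)).foldl (fun nt e => e.elim nt (fun x => pvInsertCleanB nt x))
        (List.replicate (pvGrow (if st.2 + 1 ≤ 50000 then (st.2 + 1)*4 else (st.2 + 1)*2) 64 8) none),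
       st.2 + 1)
    else (st.1.set idx (some k), st.2 + 1))

def pvSetListB (xs : List Int) : List Int :=
  (xs.foldl pvAddB (List.replicate 8 none, 0)).1.reduceOption

-- itertools.groupby(_, key) with the run lengths taken: lengths of maximal blocks of equal adjacent keys
def pvGroupLens : List Int → Int → Int → List Int
  | [], _, c => [c]
  | k' :: r, k, c => if k' = k then pvGroupLens r k (c+1) else c :: pvGroupLens r k' 1

def activeYears_alt (years : List Int) : List Int :=
  let ys := pvSetListB (PySem.List.sorted years (fun x => x) false) ++ [-1]
  let keys := (PySem.List.enumerate ys 0).map (fun p => p.2 - p.1)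
  let groups := match keys with
    | [] => []
    | k :: r => pvGroupLens r k 1
  PySem.List.slice groups none (some (-1))

-- ===== PRECONDITION & SPEC =====
def Spec_activeYears (years : List Int) (out : List Int) : Prop := out = activeYears_alt years
instance (years : List Int) (out : List Int) : Decidable (Spec_activeYears years out) := by unfold Spec_activeYears; infer_instance

-- ===== CLAIM (what is proved, stated in full; the proofs are below) =====
def Claim_equal_activeYears : Prop := ∀ (years : List Int), Dom_activeYears years → Spec_activeYears years (activeYears years)

-- ===== LEMMAS AND PROOFS =====

-- B's generic scan with a comparison key is A's set_add_entry inner loop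
theorem scanB_some (t : List (Option Int)) (key : Int) : ∀ (p i : Nat),
    pvScanB t (some key) (List.range' i (p+1)) = pvInner t key i p := by
  intro p
  induction p with
  | zero =>
    intro i
    rw [List.range'_succ]
    cases h : t.getD i none <;> simp [pvScanB, pvInner, eq_comm]
  | succ p ih =>
    intro i
    rw [List.range'_succ]
    cases h : t.getD i none <;> simp [pvScanB, pvInner, eq_comm, ih (i+1)]

-- B's generic scan without a comparison key is A's set_insert_clean inner loop
theorem scanB_none (t : List (Option Int)) : ∀ (p i : Nat),
    pvScanB t none (List.range' i (p+1)) = Option.map some (pvInnerClean t i p) := by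
  intro p
  induction p with
  | zero =>
    intro i
    rw [List.range'_succ]
    cases h : t.getD i none <;> simp only [List.getD] at h <;> simp [pvScanB, pvInnerClean, h]
  | succ p ih =>
    intro i
    rw [List.range'_succ]
    cases h : t.getD i none <;> simp only [List.getD] at h <;> simp [pvScanB, pvInnerClean, h, ih (i+1)]

-- the generic engine with a comparison key is A's set_add_entry outer loop
theorem probeB_some (t : List (Option Int)) (mask : Nat) (key : Int) : ∀ (fuel perturb i : Nat),
    pvProbeB t mask (some key) fuel perturb i = pvOuter t mask key fuel perturb i := by
  intro fuel
  induction fuel with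
  | zero => intro _ _; rfl
  | succ fuel ih =>
    intro perturb i
    simp only [pvProbeB, pvOuter, pvSlotsB]
    split_ifs with h
    · rw [scanB_some t key 9 i]
      cases h9 : pvInner t key i 9 <;> simp [ih]
    · rw [scanB_some t key 0 i]
      cases h0 : pvInner t key i 0 <;> simp [ih]

-- the generic engine without a comparison key is A's set_insert_clean outer loop
theorem probeB_none (t : List (Option Int)) (mask : Nat) : ∀ (fuel perturb i : Nat),
    pvProbeB t mask none fuel perturb i = pvOuterClean t mask fuel perturb i := by
  intro fuel
  induction fuel with
  | zero => intro _ _; rfl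
  | succ fuel ih =>
    intro perturb i
    simp only [pvProbeB, pvOuterClean, pvSlotsB]
    split_ifs with h
    · rw [scanB_none t 9 i]
      cases h9 : pvInnerClean t i 9 <;> simp [ih]
    · rw [scanB_none t 0 i]
      cases h0 : pvInnerClean t i 0 <;> simp [ih]

theorem insertCleanB_eq (t : List (Option Int)) (k : Int) :
    pvInsertCleanB t k = pvInsertClean t k := by
  unfold pvInsertCleanB pvInsertClean
  rw [probeB_none]
  cases h : pvOuterClean t (t.length - 1) (t.length - 1 + 65) (pvHash k) (pvHash k % (t.length - 1 + 1)) <;>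
    simp [h]

theorem addB_eq : pvAddB = pvAdd := by
  funext st k
  unfold pvAddB pvAdd
  rw [probeB_some]
  cases h : pvOuter st.1 (st.1.length - 1) k (st.1.length - 1 + 65) (pvHash k) (pvHash k % (st.1.length - 1 + 1)) with
  | none => simp [h]
  | some idx =>
    have hfun : (fun (nt : List (Option Int)) (e : Option Int) => e.elim nt (fun x => pvInsertCleanB nt x))
        = (fun (nt : List (Option Int)) (e : Option Int) => match e with
            | none => nt
            | some k => pvInsertClean nt k) := by
      funext nt e
      cases e with
      | none => rfl
      | some x => exact insertCleanB_eq nt x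
    simp only [h, Option.elim_some, hfun]

theorem setListB_eq (xs : List Int) : pvSetListB xs = pvSetList xs := by
  unfold pvSetListB pvSetList
  rw [addB_eq]
  rfl

-- proof-side view of A's loop: structural recursion on adjacent pairs
def goA : List Int → Int → List Int → List Int
  | a :: b :: rest, c, res =>
    if a + 1 = b then goA (b :: rest) (c+1) res else goA (b :: rest) 1 (res ++ [c])
  | _, _, res => res

theorem pvGroupLens_ne_nil (l : List Int) (k c : Int) : pvGroupLens l k c ≠ [] := by
  induction l generalizing k c with
  | nil => simp [pvGroupLens]
  | cons k' r ih =>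
    simp only [pvGroupLens]; split
    · apply ih
    · simp

-- A's adjacent-pair recursion equals B's grouped-key run lengths minus the last group
theorem goA_eq_groups (rest : List Int) : ∀ (a j c : Int) (res : List Int),
    goA (a :: rest) c res
      = res ++ (pvGroupLens ((PySem.List.enumerate rest (j+1)).map (fun p => p.2 - p.1)) (a - j) c).dropLast := by
  induction rest with
  | nil => intro a j c res; simp [goA, pvGroupLens]
  | cons b r ih =>
    intro a j c res
    rw [PySem.List.enumerate_cons]
    simp only [goA, List.map_cons, pvGroupLens]
    by_cases hb : a + 1 = b
    · have hk : b - (j+1) = a - j := by omega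
      rw [if_pos hb, if_pos hk, ih b (j+1) (c+1) res, hk]
    · have hk : ¬ (b - (j+1) = a - j) := by omega
      rw [if_neg hb, if_neg hk, ih b (j+1) 1 (res ++ [c])]
      rw [List.dropLast_cons_of_ne_nil (pvGroupLens_ne_nil _ _ _)]
      simp

-- A's index foldl over range(len-1) equals the adjacent-pair recursion on the suffix from j
theorem foldlA_eq_goA (ys : List Int) : ∀ (n j : Nat) (c : Int) (res : List Int),
    j + n + 1 = ys.length →
    ((PySem.List.pyRange (j : Int) (PySem.List.len ys - 1) 1).foldl
      (fun st i =>
        if PySem.List.pyGetD ys i 0 + 1 = PySem.List.pyGetD ys (i+1) 0 then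
          (st.1, st.2 + 1)
        else
          (st.1 ++ [st.2], (1 : Int)))
      (res, c)).1 = goA (ys.drop j) c res := by
  intro n
  induction n with
  | zero =>
    intro j c res hlen
    have hj : j < ys.length := by omega
    have h1 : PySem.List.len ys - 1 = (j : Int) := by
      simp [PySem.List.len_eq]; omega
    rw [h1, PySem.List.pyRange_one_eq_nil le_rfl]
    have h2 : ys.drop j = [ys[j]] := by
      rw [← List.getElem_cons_drop hj, List.drop_eq_nil_of_le (by omega)]
    rw [h2]
    simp [goA]
  | succ n ih =>
    intro j c res hlen
    have hj1 : j + 1 < ys.length := by omega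
    have hj : j < ys.length := by omega
    have hj2 : j + 1 + 1 ≤ ys.length := by omega
    have hcons : PySem.List.pyRange (j : Int) (PySem.List.len ys - 1) 1
        = (j : Int) :: PySem.List.pyRange ((j : Int) + 1) (PySem.List.len ys - 1) 1 := by
      apply PySem.List.pyRange_one_cons
      simp [PySem.List.len_eq]; omega
    have hcast : ((j : Int) + 1) = ((j + 1 : Nat) : Int) := by push_cast; ring
    have hg1 : PySem.List.pyGetD ys (j : Int) 0 = ys[j] := by
      simp [List.getD_eq_getElem?_getD, hj]
    have hg2 : PySem.List.pyGetD ys ((j : Int) + 1) 0 = ys[j+1] := by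
      rw [hcast, PySem.List.pyGetD_natCast]
      rw [List.getD_eq_getElem?_getD, List.getElem?_eq_getElem hj1]
      rfl
    have hdropj : ys.drop j = ys[j] :: ys.drop (j+1) := (List.getElem_cons_drop hj).symm
    have hdropj1 : ys.drop (j+1) = ys[j+1] :: ys.drop (j+1+1) := (List.getElem_cons_drop hj1).symm
    rw [hcons, List.foldl_cons]
    by_cases hcmp : ys[j] + 1 = ys[j+1]
    · rw [if_pos (by rw [hg1, hg2]; exact hcmp)]
      have h := ih (j+1) (c+1) res (by omega)
      rw [hcast, h, hdropj, hdropj1]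
      simp [goA, hcmp]
    · rw [if_neg (by rw [hg1, hg2]; exact hcmp)]
      have h := ih (j+1) 1 (res ++ [c]) (by omega)
      rw [hcast, h, hdropj, hdropj1]
      simp [goA, hcmp]

-- ===== VERDICT (by name: the statement is the Claim_ definition above) =====
theorem activeYears_spec : Claim_equal_activeYears := by
  unfold Claim_equal_activeYears Spec_activeYears
  intro years _
  unfold activeYears activeYears_alt
  rw [setListB_eq]
  cases hz : pvSetList (PySem.List.sorted years (fun x => x) false) with
  | nil => decide
  | cons z t =>
    have hA := foldlA_eq_goA ((z :: t) ++ [-1]) (t.length + 1) 0 1 [] (by simp)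
    have hG := goA_eq_groups (t ++ [-1]) z 0 1 []
    simp only [Nat.cast_zero, List.drop_zero, List.cons_append] at hA
    norm_num at hG
    simp only [List.cons_append, PySem.List.enumerate_cons, List.map_cons,
      PySem.List.slice_to_neg_one]
    rw [hA, hG]
    norm_num
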